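-- pv_equiv track=rewrite | github.com/engr-hasanuzzaman/Programming-contest | python/max_continuous_sequence.py | findIndexofZero
-- ===== SOURCE A (Python) =====
-- from typing import List
--
-- def findIndexofZero(nums: List[int]) -> int:
-- 	# Write your code here...
-- 	continuous_neighbors = [0] * len(nums)
-- 	cur_count = 0
-- 	zero_count = 0
-- 	for i, n in enumerate(nums):
-- 		if n == 0:
-- 			continuous_neighbors[i] += cur_count
-- 			cur_count = 0
-- 			zero_count += 1
-- 		else:
-- 			cur_count += 1
-- 	if zero_count == 0: return -1
-- 	cur_count = 0
--
-- 	for i in range(len(nums) - 1, -1, -1):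
-- 		if nums[i] == 0:
-- 			continuous_neighbors[i] += cur_count
-- 			cur_count = 0
-- 		else:
-- 			cur_count += 1
-- 	cur_max = 0
-- 	max_index = 0
-- 	for i in range(len(nums)):
-- 		if continuous_neighbors[i] > cur_max:
-- 			cur_max = continuous_neighbors[i]
-- 			max_index = i
-- 	return max_index
-- ===== SOURCE B (Python) =====
-- from typing import List
--
-- def findIndexofZero(nums: List[int]) -> int:
--     zeros = [i for i, v in enumerate(nums) if v == 0]
--     if not zeros:
--         return -1
--     best_val, best_idx = 0, 0
--     prev = -1
--     for k, z in enumerate(zeros):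
--         nxt = zeros[k + 1] if k + 1 < len(zeros) else len(nums)
--         val = (z - prev - 1) + (nxt - z - 1)
--         if val > best_val:
--             best_val, best_idx = val, z
--         prev = z
--     return best_idx
-- ===== Notes on version B (the rewrite author's own statement) =====
-- stated objective: simpler
-- what changed: Replaces A's three full-array passes (forward run counter, backward run counter, argmax scan) with one comprehension collecting the zero positions and a single pass over that sparse list computing each zero's left+right run by index arithmetic against its neighbouring zeros.
import Mathlib
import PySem

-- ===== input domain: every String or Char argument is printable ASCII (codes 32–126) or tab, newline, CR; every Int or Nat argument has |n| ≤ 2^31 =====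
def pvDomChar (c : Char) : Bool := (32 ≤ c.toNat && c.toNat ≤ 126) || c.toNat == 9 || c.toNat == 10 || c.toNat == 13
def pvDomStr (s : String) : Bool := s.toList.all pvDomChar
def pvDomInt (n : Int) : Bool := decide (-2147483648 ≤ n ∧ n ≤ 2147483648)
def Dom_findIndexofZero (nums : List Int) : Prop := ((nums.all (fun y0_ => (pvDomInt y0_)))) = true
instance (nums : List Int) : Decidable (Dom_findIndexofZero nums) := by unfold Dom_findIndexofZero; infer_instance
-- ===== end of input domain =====

-- B replaces A's three full-array passes by one pass over just the zero positions, using index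
-- arithmetic between neighbouring zeros (objective: simpler decomposition, same asymptotic cost).

-- ===== PORT A =====
-- literal transliteration of A: forward pass over enumerate(nums), backward pass over
-- range(len-1,-1,-1), then an argmax scan over range(len).  List subscript assignment
-- 'continuous_neighbors[i] += c' is rendered set/getD at the (always in-range, nonnegative) index.
def findIndexofZero (nums : List Int) : Int :=
  let fwd := (PySem.List.enumerate nums 0).foldl
    (fun (st : List Int × Int × Int) (p : Int × Int) =>
      if p.2 == 0 then
        (st.1.set p.1.toNat (st.1.getD p.1.toNat 0 + st.2.1), 0, st.2.2 + 1)
      else (st.1, st.2.1 + 1, st.2.2))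
    (List.replicate nums.length 0, 0, 0)
  if fwd.2.2 == 0 then -1 else
  let bwd := (PySem.List.pyRange ((nums.length : Int) - 1) (-1) (-1)).foldl
    (fun (st : List Int × Int) (i : Int) =>
      if PySem.List.pyGetD nums i 0 == 0 then
        (st.1.set i.toNat (st.1.getD i.toNat 0 + st.2), 0)
      else (st.1, st.2 + 1))
    (fwd.1, 0)
  let fin := (PySem.List.pyRange 0 (nums.length : Int) 1).foldl
    (fun (st : Int × Int) (i : Int) =>
      if PySem.List.pyGetD bwd.1 i 0 > st.1 then (PySem.List.pyGetD bwd.1 i 0, i) else st)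
    (0, 0)
  fin.2

-- ===== PORT B =====
-- literal transliteration of Source B: collect zero indices, then one pass over that list with
-- prev/next-zero index arithmetic.
def findIndexofZero_alt (nums : List Int) : Int :=
  let zeros : List Int :=
    ((PySem.List.enumerate nums 0).filter (fun p => p.2 == 0)).map (fun p => p.1)
  if zeros.isEmpty then -1 else
  let st := (PySem.List.enumerate zeros 0).foldl
    (fun (st : Int × Int × Int) (p : Int × Int) =>
      let z := p.2
      let nxt := if p.1 + 1 < (zeros.length : Int) then PySem.List.pyGetD zeros (p.1 + 1) 0
                 else (nums.length : Int)
      let v := (z - st.1 - 1) + (nxt - z - 1)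
      if v > st.2.1 then (z, v, z) else (z, st.2.1, st.2.2))
    (-1, 0, 0)
  st.2.2

-- ===== PRECONDITION & SPEC =====
def Spec_findIndexofZero (nums : List Int) (out : Int) : Prop := out = findIndexofZero_alt nums
instance (nums : List Int) (out : Int) : Decidable (Spec_findIndexofZero nums out) := by unfold Spec_findIndexofZero; infer_instance

-- ===== CLAIM (what is proved, stated in full; the proofs are below) =====
def Claim_equal_findIndexofZero : Prop := ∀ (nums : List Int), Dom_findIndexofZero nums → Spec_findIndexofZero nums (findIndexofZero nums)

-- ===== LEMMAS AND PROOFS =====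

-- P i: nums[i] is a zero (indices out of range count as nonzero; only i < length is ever used).
def pvP (nums : List Int) (i : Nat) : Bool := nums.getD i 0 == 0

-- last zero index strictly below m, or -1
def pvLz (nums : List Int) : Nat → Int
  | 0 => -1
  | m + 1 => if pvP nums m then (m : Int) else pvLz nums m

-- first zero index ≥ m, or length
def pvNz (nums : List Int) (m : Nat) : Int :=
  match (List.range' m (nums.length - m)).find? (pvP nums) with
  | some j => (j : Int)
  | none => (nums.length : Int)

-- the value A's array holds at a zero index
def pvVal (nums : List Int) (i : Nat) : Int :=
  ((i : Int) - pvLz nums i - 1) + (pvNz nums (i + 1) - (i : Int) - 1)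

-- entry of the array after the forward pass has processed indices < m
def pvG (nums : List Int) (m i : Nat) : Int :=
  if i < m ∧ pvP nums i = true then (i : Int) - pvLz nums i - 1 else 0

-- entry after the backward pass has additionally processed indices ≥ m
def pvG2 (nums : List Int) (m i : Nat) : Int :=
  if pvP nums i = true then
    ((i : Int) - pvLz nums i - 1) + (if m ≤ i then pvNz nums (i + 1) - (i : Int) - 1 else 0)
  else 0

def pvZerosFrom (nums : List Int) (m : Nat) : List Nat :=
  (List.range' m (nums.length - m)).filter (pvP nums)

def pvZeros (nums : List Int) : List Nat := pvZerosFrom nums 0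

-- chain of "previous zero" links
def pvAdjL (nums : List Int) : Int → List Nat → Prop
  | _, [] => True
  | p, z :: r => pvLz nums z = p ∧ pvAdjL nums (z : Int) r

-- chain of "next zero" links
def pvAdjN (nums : List Int) : List Nat → Prop
  | [] => True
  | [z] => pvNz nums (z + 1) = (nums.length : Int)
  | z :: w :: r => pvNz nums (z + 1) = (w : Int) ∧ pvAdjN nums (w :: r)

-- A's argmax step over the zero list
def pvAfold (nums : List Int) (st : Int × Int) (l : List Nat) : Int × Int :=
  l.foldl (fun st i => if pvVal nums i > st.1 then (pvVal nums i, (i : Int)) else st) st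

theorem pvNz_len (nums : List Int) : pvNz nums nums.length = (nums.length : Int) := by
  simp [pvNz]

theorem pvNz_step (nums : List Int) (m : Nat) (h : m < nums.length) :
    pvNz nums m = if pvP nums m then (m : Int) else pvNz nums (m + 1) := by
  have h1 : nums.length - m = (nums.length - (m + 1)) + 1 := by omega
  rw [pvNz, h1, List.range'_succ, List.find?_cons]
  by_cases hp : pvP nums m
  · simp [hp]
  · simp [hp, pvNz]

theorem mapRange_getD (n i : Nat) (g : Nat → Int) (h : i < n) :
    ((List.range n).map g).getD i 0 = g i := by
  rw [List.getD_eq_getElem _ _ (by simpa using h)]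
  simp

theorem mapRange_set (n i : Nat) (g : Nat → Int) (v : Int) :
    ((List.range n).map g).set i v
      = (List.range n).map (fun j => if j = i then v else g j) := by
  apply List.ext_getElem
  · simp
  · intro j hj hj'
    simp only [List.getElem_set, List.getElem_map, List.getElem_range]
    split
    · simp_all
    · have : j ≠ i := by omega
      simp [this]

theorem enumerate_eq_mapRange (nums : List Int) :
    PySem.List.enumerate nums 0
      = (List.range nums.length).map (fun (k : Nat) => ((k : Int), nums.getD k 0)) := by
  apply List.ext_getElem
  · simp [PySem.List.length_enumerate]
  · intro j hj hj'
    rw [PySem.List.getElem_enumerate]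
    simp only [List.getElem_map, List.getElem_range]
    have hjl : j < nums.length := by simpa [PySem.List.length_enumerate] using hj
    rw [List.getD_eq_getElem _ _ hjl]
    simp

-- forward pass invariant
theorem forward_inv (nums : List Int) (m : Nat) (hm : m ≤ nums.length) :
    ((List.range m).map (fun (k : Nat) => ((k : Int), nums.getD k 0))).foldl
      (fun (st : List Int × Int × Int) (p : Int × Int) =>
        if p.2 == 0 then
          (st.1.set p.1.toNat (st.1.getD p.1.toNat 0 + st.2.1), 0, st.2.2 + 1)
        else (st.1, st.2.1 + 1, st.2.2))
      (List.replicate nums.length 0, 0, 0)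
    = ((List.range nums.length).map (pvG nums m), (m : Int) - pvLz nums m - 1,
        (((List.range m).filter (pvP nums)).length : Int)) := by
  induction m with
  | zero =>
      simp only [List.range_zero, List.map_nil, List.foldl_nil]
      refine Prod.ext ?_ (Prod.ext ?_ ?_) <;> simp only
      · symm
        rw [List.eq_replicate_iff]
        refine ⟨by simp, ?_⟩
        intro b hb
        simp only [List.mem_map, List.mem_range] at hb
        obtain ⟨a, _, hab⟩ := hb
        simp [pvG] at hab
        omega
      · simp [pvLz]
      · rfl
  | succ m ih =>
      have hm' : m ≤ nums.length := by omega
      have hmn : m < nums.length := by omega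
      rw [List.range_succ, List.map_append, List.foldl_append, ih hm']
      simp only [List.map_cons, List.map_nil, List.foldl_cons, List.foldl_nil]
      by_cases hp : pvP nums m
      · have hz : (nums.getD m 0 == 0) = true := hp
        rw [if_pos hz]
        refine Prod.ext ?_ (Prod.ext ?_ ?_) <;> simp only [Int.toNat_natCast]
        · rw [mapRange_getD _ _ _ hmn, mapRange_set]
          apply List.map_congr_left
          intro j hj
          by_cases hjm : j = m
          · subst hjm
            simp [pvG, hp]
          · rw [if_neg hjm]
            simp only [pvG]
            have : (j < m + 1 ∧ pvP nums j = true) ↔ (j < m ∧ pvP nums j = true) := by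
              constructor <;> rintro ⟨h1, h2⟩ <;> exact ⟨by omega, h2⟩
            rw [if_congr this rfl rfl]
        · simp [pvLz, hp]
        · rw [List.filter_append]
          simp [hp]
      · have hz : ¬ ((nums.getD m 0 == 0) = true) := by simpa [pvP] using hp
        rw [if_neg hz]
        refine Prod.ext ?_ (Prod.ext ?_ ?_) <;> simp only
        · apply List.map_congr_left
          intro j hj
          simp only [pvG]
          have : (j < m + 1 ∧ pvP nums j = true) ↔ (j < m ∧ pvP nums j = true) := by
            constructor <;> rintro ⟨h1, h2⟩
            · refine ⟨?_, h2⟩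
              rcases Nat.lt_succ_iff_lt_or_eq.mp h1 with h | h
              · exact h
              · exact absurd (h ▸ h2) hp
            · exact ⟨by omega, h2⟩
          rw [if_congr this rfl rfl]
        · simp only [pvLz, hp, Bool.false_eq_true, if_false]
          push_cast
          ring
        · rw [List.filter_append]
          simp [hp]

-- backward pass invariant (processing indices n-1 down to n-j)
theorem backward_inv (nums : List Int) (j : Nat) (hj : j ≤ nums.length) :
    ((List.range j).map (fun (k : Nat) => ((nums.length : Int) - 1 - (k : Int)))).foldl
      (fun (st : List Int × Int) (i : Int) =>
        if PySem.List.pyGetD nums i 0 == 0 then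
          (st.1.set i.toNat (st.1.getD i.toNat 0 + st.2), 0)
        else (st.1, st.2 + 1))
      ((List.range nums.length).map (pvG nums nums.length), 0)
    = ((List.range nums.length).map (pvG2 nums (nums.length - j)),
        pvNz nums (nums.length - j) - ((nums.length - j : Nat) : Int)) := by
  induction j with
  | zero =>
      simp only [List.range_zero, List.map_nil, List.foldl_nil, Nat.sub_zero]
      refine Prod.ext ?_ ?_ <;> simp only
      · apply List.map_congr_left
        intro i hi
        simp only [List.mem_range] at hi
        simp only [pvG, pvG2]
        by_cases hPi : pvP nums i
        · simp [hPi, hi, Nat.not_le.mpr hi]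
        · simp [hPi]
      · rw [pvNz_len]
        ring
  | succ j ih =>
      have hj' : j ≤ nums.length := by omega
      have hlt : nums.length - j - 1 < nums.length := by omega
      rw [List.range_succ, List.map_append, List.foldl_append, ih hj']
      simp only [List.map_cons, List.map_nil, List.foldl_cons, List.foldl_nil]
      have hidx : (nums.length : Int) - 1 - (j : Int) = ((nums.length - j - 1 : Nat) : Int) := by
        omega
      rw [hidx, PySem.List.pyGetD_natCast]
      have hm1 : nums.length - (j + 1) = nums.length - j - 1 := by omega
      rw [hm1]
      have ha : nums.length - j = (nums.length - j - 1) + 1 := by omega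
      by_cases hp : pvP nums (nums.length - j - 1)
      · have hz : (nums.getD (nums.length - j - 1) 0 == 0) = true := hp
        rw [if_pos hz]
        refine Prod.ext ?_ ?_ <;> simp only [Int.toNat_natCast]
        · rw [mapRange_getD _ _ _ hlt, mapRange_set]
          apply List.map_congr_left
          intro i hi
          by_cases him : i = nums.length - j - 1
          · subst him
            rw [if_pos rfl]
            simp only [pvG2, hp, if_pos, le_refl, ← ha,
              Nat.not_le.mpr (Nat.lt_of_lt_of_le (Nat.lt_succ_self _) (le_of_eq ha.symm))]
            rw [if_neg not_false]
            have hc : ((nums.length - j : Nat) : Int) = ((nums.length - j - 1 : Nat) : Int) + 1 := by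
              omega
            rw [hc]
            ring
          · rw [if_neg him]
            simp only [pvG2]
            by_cases hPi : pvP nums i
            · simp only [hPi]
              have : (nums.length - j - 1 ≤ i) ↔ (nums.length - j ≤ i) := by omega
              rw [if_congr this rfl rfl]
            · simp [hPi]
        · have := pvNz_step nums (nums.length - j - 1) hlt
          rw [if_pos hp] at this
          rw [this]
          ring
      · have hz : ¬ ((nums.getD (nums.length - j - 1) 0 == 0) = true) := hp
        rw [if_neg hz]
        refine Prod.ext ?_ ?_ <;> simp only
        · apply List.map_congr_left
          intro i hi
          simp only [pvG2]
          by_cases hPi : pvP nums i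
          · simp only [hPi]
            have him : i ≠ nums.length - j - 1 := fun h => hp (h ▸ hPi)
            have : (nums.length - j ≤ i) ↔ (nums.length - j - 1 ≤ i) := by omega
            rw [if_congr this rfl rfl]
          · simp [hPi]
        · have := pvNz_step nums (nums.length - j - 1) hlt
          rw [if_neg (by simpa using hp)] at this
          rw [← ha] at this
          rw [this]
          omega

-- A's array value at a zero index is pvVal
theorem pvG2_zero_eq_val (nums : List Int) (i : Nat) (hp : pvP nums i = true) :
    pvG2 nums 0 i = pvVal nums i := by
  simp [pvG2, pvVal, hp]

-- the argmax scan over all indices collapses to a scan over the zero indices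
theorem filter_skip (nums : List Int) (l : List Nat) (st : Int × Int) (h0 : 0 ≤ st.1) :
    l.foldl (fun st i => if pvG2 nums 0 i > st.1 then (pvG2 nums 0 i, (i : Int)) else st) st
      = pvAfold nums st (l.filter (pvP nums)) := by
  induction l generalizing st with
  | nil => rfl
  | cons i r ih =>
      rw [List.foldl_cons, List.filter_cons]
      by_cases hp : pvP nums i
      · rw [if_pos hp]
        rw [pvG2_zero_eq_val nums i hp]
        by_cases hv : pvVal nums i > st.1
        · rw [if_pos hv, ih _ (le_of_lt (lt_of_le_of_lt h0 hv))]
          simp only [pvAfold, List.foldl_cons]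
          rw [if_pos hv]
        · rw [if_neg hv, ih _ h0]
          simp only [pvAfold, List.foldl_cons]
          rw [if_neg hv]
      · have hz : pvG2 nums 0 i = 0 := by simp [pvG2, hp]
        rw [hz, if_neg (by omega), if_neg hp, ih _ h0]

theorem zerosFrom_step (nums : List Int) (m : Nat) (h : m < nums.length) :
    pvZerosFrom nums m
      = if pvP nums m then m :: pvZerosFrom nums (m + 1) else pvZerosFrom nums (m + 1) := by
  have h1 : nums.length - m = (nums.length - (m + 1)) + 1 := by omega
  rw [pvZerosFrom, h1, List.range'_succ, List.filter_cons]
  by_cases hp : pvP nums m <;> simp [hp, pvZerosFrom]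

theorem zerosFrom_len (nums : List Int) : pvZerosFrom nums nums.length = [] := by
  simp [pvZerosFrom]

-- pvNz m is the head of the zero list from m (or the length)
theorem pvNz_eq_head (nums : List Int) (k m : Nat) (h : m + k = nums.length) :
    pvNz nums m = (match pvZerosFrom nums m with
                   | [] => (nums.length : Int)
                   | w :: _ => (w : Int)) := by
  induction k generalizing m with
  | zero =>
      have : m = nums.length := by omega
      subst this
      rw [zerosFrom_len, pvNz_len]
  | succ k ih =>
      have hm : m < nums.length := by omega
      rw [pvNz_step nums m hm, zerosFrom_step nums m hm]
      by_cases hp : pvP nums m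
      · rw [if_pos hp, if_pos hp]
      · rw [if_neg hp, if_neg hp, ih (m + 1) (by omega)]

theorem chain_adjL (nums : List Int) (k m : Nat) (h : m + k = nums.length) :
    pvAdjL nums (pvLz nums m) (pvZerosFrom nums m) := by
  induction k generalizing m with
  | zero =>
      have : m = nums.length := by omega
      subst this
      rw [zerosFrom_len]
      trivial
  | succ k ih =>
      have hm : m < nums.length := by omega
      rw [zerosFrom_step nums m hm]
      by_cases hp : pvP nums m
      · rw [if_pos hp]
        refine ⟨rfl, ?_⟩
        have := ih (m + 1) (by omega)
        rwa [show pvLz nums (m + 1) = (m : Int) by simp [pvLz, hp]] at this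
      · rw [if_neg hp]
        have := ih (m + 1) (by omega)
        rwa [show pvLz nums (m + 1) = pvLz nums m by simp [pvLz, hp]] at this

theorem chain_adjN (nums : List Int) (k m : Nat) (h : m + k = nums.length) :
    pvAdjN nums (pvZerosFrom nums m) := by
  induction k generalizing m with
  | zero =>
      have : m = nums.length := by omega
      subst this
      rw [zerosFrom_len]
      trivial
  | succ k ih =>
      have hm : m < nums.length := by omega
      rw [zerosFrom_step nums m hm]
      by_cases hp : pvP nums m
      · rw [if_pos hp]
        have hh := pvNz_eq_head nums k (m + 1) (by omega)
        have ht := ih (m + 1) (by omega)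
        cases hz : pvZerosFrom nums (m + 1) with
        | nil =>
            rw [hz] at hh
            exact hh
        | cons w r =>
            rw [hz] at hh ht
            exact ⟨hh, ht⟩
      · rw [if_neg hp]
        exact ih (m + 1) (by omega)

-- B's loop step (lookup of the next zero goes into the full zero list)
def pvBstep (nums : List Int) (st : Int × Int × Int) (p : Int × Int) : Int × Int × Int :=
  let z := p.2
  let nxt := if p.1 + 1 < (((pvZeros nums).map (fun (i : Nat) => (i : Int))).length : Int)
             then PySem.List.pyGetD ((pvZeros nums).map (fun (i : Nat) => (i : Int))) (p.1 + 1) 0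
             else (nums.length : Int)
  let v := (z - st.1 - 1) + (nxt - z - 1)
  if v > st.2.1 then (z, v, z) else (z, st.2.1, st.2.2)

-- B's enumerate-with-lookup fold equals A's argmax fold over the zero indices
theorem main_fold (nums : List Int) (l : List Nat) (prev bv bi : Int) (k0 : Nat)
    (hL : pvAdjL nums prev l) (hN : pvAdjN nums l)
    (hdrop : ((pvZeros nums).map (fun (i : Nat) => (i : Int))).drop k0 = l.map (fun (i : Nat) => (i : Int))) :
    ((PySem.List.enumerate (l.map (fun (i : Nat) => (i : Int))) (k0 : Int)).foldl
      (pvBstep nums) (prev, bv, bi)).2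
    = pvAfold nums (bv, bi) l := by
  induction l generalizing k0 prev bv bi with
  | nil =>
      simp [pvAfold]
  | cons z r ih =>
      obtain ⟨hLz, hLr⟩ := hL
      rw [List.map_cons, PySem.List.enumerate_cons, List.foldl_cons]
      have hlen : ((pvZeros nums).map (fun (i : Nat) => (i : Int))).length = k0 + 1 + r.length := by
        have hc := congrArg List.length hdrop
        simp only [List.length_drop, List.length_map, List.length_cons] at hc ⊢
        omega
      have hd1 : ((pvZeros nums).map (fun (i : Nat) => (i : Int))).drop (k0 + 1)
          = r.map (fun (i : Nat) => (i : Int)) := by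
        rw [← List.tail_drop, hdrop]
        rfl
      have hcast : (k0 : Int) + 1 = ((k0 + 1 : Nat) : Int) := by push_cast; ring
      have hstep : pvBstep nums (prev, bv, bi) ((k0 : Int), (z : Int))
          = (if pvVal nums z > bv then ((z : Int), pvVal nums z, (z : Int))
             else ((z : Int), bv, bi)) := by
        have hnxt : (if (k0 : Int) + 1 < ((((pvZeros nums).map (fun (i : Nat) => (i : Int))).length : Nat) : Int)
                     then PySem.List.pyGetD ((pvZeros nums).map (fun (i : Nat) => (i : Int))) ((k0 : Int) + 1) 0
                     else (nums.length : Int)) = pvNz nums (z + 1) := by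
          cases r with
          | nil =>
              rw [if_neg (by rw [hlen]; push_cast [List.length_nil]; omega)]
              exact hN.symm
          | cons w r' =>
              rw [if_pos (by rw [hlen]; push_cast [List.length_cons]; omega)]
              rw [hcast, PySem.List.pyGetD_natCast]
              have hget : ((pvZeros nums).map (fun (i : Nat) => (i : Int)))[k0 + 1]? = some ((w : Int)) := by
                have h0 : ((pvZeros nums).map (fun (i : Nat) => (i : Int)))[k0 + 1 + 0]?
                    = (((pvZeros nums).map (fun (i : Nat) => (i : Int))).drop (k0 + 1))[0]? := by
                  rw [List.getElem?_drop]
                rw [← Nat.add_zero (k0 + 1), h0, hd1]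
                simp
              rw [List.getD_eq_getElem?_getD, hget]
              exact hN.1.symm
        simp only [pvBstep]
        rw [hnxt]
        simp only [pvVal, hLz]
      rw [hstep]
      have hAfold : pvAfold nums (bv, bi) (z :: r)
          = pvAfold nums (if pvVal nums z > bv then (pvVal nums z, (z : Int)) else (bv, bi)) r := by
        simp only [pvAfold, List.foldl_cons]
      rw [hAfold]
      have hNr : pvAdjN nums r := by
        cases r with
        | nil => trivial
        | cons w r' => exact hN.2
      by_cases hv : pvVal nums z > bv
      · rw [if_pos hv, if_pos hv, hcast]
        exact ih (z : Int) (pvVal nums z) (z : Int) (k0 + 1) hLr hNr hd1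
      · rw [if_neg hv, if_neg hv, hcast]
        exact ih (z : Int) bv bi (k0 + 1) hLr hNr hd1

theorem pvZeros_eq (nums : List Int) :
    pvZeros nums = (List.range nums.length).filter (pvP nums) := by
  rw [pvZeros, pvZerosFrom, Nat.sub_zero, List.range_eq_range']

-- B's zero list is the Int-cast of pvZeros
theorem zeros_eq (nums : List Int) :
    ((PySem.List.enumerate nums 0).filter (fun p => p.2 == 0)).map (fun p => p.1)
      = (pvZeros nums).map (fun (i : Nat) => (i : Int)) := by
  rw [enumerate_eq_mapRange, List.filter_map, List.map_map, pvZeros_eq]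
  rw [show ((fun (p : Int × Int) => p.2 == 0) ∘ fun (k : Nat) => ((k : Int), nums.getD k 0))
      = pvP nums from funext fun k => by simp [pvP]]
  apply List.map_congr_left
  intro k _
  rfl

-- ===== VERDICT (by name: the statement is the Claim_ definition above) =====
theorem findIndexofZero_spec : Claim_equal_findIndexofZero := by
  intro nums _
  unfold Spec_findIndexofZero
  simp only [findIndexofZero, findIndexofZero_alt]
  rw [zeros_eq]
  have hF := forward_inv nums nums.length le_rfl
  rw [enumerate_eq_mapRange, hF]
  by_cases hempty : pvZeros nums = []
  · have hflt : (List.range nums.length).filter (pvP nums) = [] := by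
      rw [← pvZeros_eq]; exact hempty
    rw [hflt, hempty]
    simp
  · have hflt : ((List.range nums.length).filter (pvP nums)).length ≠ 0 := by
      rw [← pvZeros_eq]
      simp [List.length_eq_zero_iff, hempty]
    have hc1 : ((((List.range nums.length).filter (pvP nums)).length : Int) == 0) = false := by
      simp [hflt]
    rw [hc1]
    have hc2 : (((pvZeros nums).map (fun (i : Nat) => (i : Int))).isEmpty) = false := by
      simp [hempty]
    rw [hc2]
    simp only [Bool.false_eq_true, if_false]
    -- backward pass
    have hrange : PySem.List.pyRange ((nums.length : Int) - 1) (-1) (-1)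
        = (List.range nums.length).map (fun (k : Nat) => ((nums.length : Int) - 1 - (k : Int))) := by
      have ht : ((nums.length : Int) - 1 - (-1)).toNat = nums.length := by omega
      rw [PySem.List.pyRange_neg_one, ht]
    rw [hrange]
    have hB := backward_inv nums nums.length le_rfl
    rw [hB]
    simp only [Nat.sub_self]
    -- final argmax scan
    have hrange2 : PySem.List.pyRange 0 (nums.length : Int) 1
        = (List.range nums.length).map (fun (k : Nat) => ((k : Int))) := by
      have ht : ((nums.length : Int) - 0).toNat = nums.length := by omega
      rw [PySem.List.pyRange_one, ht]
      apply List.map_congr_left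
      intro k _
      omega
    rw [hrange2, List.foldl_map]
    have hcongr : (List.range nums.length).foldl
        (fun (st : Int × Int) (k : Nat) =>
          if PySem.List.pyGetD ((List.range nums.length).map (pvG2 nums 0)) ((k : Int)) 0 > st.1
          then (PySem.List.pyGetD ((List.range nums.length).map (pvG2 nums 0)) ((k : Int)) 0, ((k : Int)))
          else st) (0, 0)
        = (List.range nums.length).foldl
        (fun (st : Int × Int) (k : Nat) =>
          if pvG2 nums 0 k > st.1 then (pvG2 nums 0 k, (k : Int)) else st) (0, 0) := by
      apply PySem.List.foldl_congr_mem
      intro acc k hk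
      simp only [List.mem_range] at hk
      rw [PySem.List.pyGetD_natCast, mapRange_getD _ _ _ hk]
    rw [hcongr, filter_skip nums _ (0, 0) (by norm_num), ← pvZeros_eq]
    -- B's side
    have hbstep : (fun (st : Int × Int × Int) (p : Int × Int) =>
        let z := p.2
        let nxt := if p.1 + 1 < ((((pvZeros nums).map (fun (i : Nat) => (i : Int))).length : Nat) : Int)
                   then PySem.List.pyGetD ((pvZeros nums).map (fun (i : Nat) => (i : Int))) (p.1 + 1) 0
                   else (nums.length : Int)
        let v := (z - st.1 - 1) + (nxt - z - 1)
        if v > st.2.1 then (z, v, z) else (z, st.2.1, st.2.2)) = pvBstep nums := rfl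
    rw [hbstep]
    have hL := chain_adjL nums nums.length 0 (by omega)
    rw [show pvLz nums 0 = -1 from rfl] at hL
    have hN := chain_adjN nums nums.length 0 (by omega)
    have hM := main_fold nums (pvZeros nums) (-1) 0 0 0 hL hN (by rw [List.drop_zero])
    rw [Nat.cast_zero] at hM
    rw [hM]
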